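-- pv_equiv track=rewrite | github.com/AcidNick/Python_inf100_UiB_projects | Lab6/kvidoria.py | pop_most_common_word
-- ===== SOURCE A (Python) =====
-- def pop_most_common_word(word_count: dict) -> str:
--     max_word = list(word_count.keys())[0]
--     for word in word_count.keys():
--         if word_count[word] > word_count[max_word]:
--             max_word = word
--         if word_count[word] == word_count[max_word]:
--             if word < max_word:
--                 max_word = word
--     word_count.pop(max_word)
--     return max_word
-- ===== SOURCE B (Python) =====
-- def pop_most_common_word(word_count: dict) -> str:
--     chosen = sorted(word_count, key=lambda w: (-word_count[w], w))[0]
--     word_count.pop(chosen)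
--     return chosen
-- ===== Notes on version B (the rewrite author's own statement) =====
-- stated objective: simpler
-- what changed: Replaces the running-best scan with its double conditional update by a single sort of the keys under the (-count, word) tuple key and taking the first element (sorted(...)[0] keeps the IndexError on an empty dict), then popping it.
import Mathlib
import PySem

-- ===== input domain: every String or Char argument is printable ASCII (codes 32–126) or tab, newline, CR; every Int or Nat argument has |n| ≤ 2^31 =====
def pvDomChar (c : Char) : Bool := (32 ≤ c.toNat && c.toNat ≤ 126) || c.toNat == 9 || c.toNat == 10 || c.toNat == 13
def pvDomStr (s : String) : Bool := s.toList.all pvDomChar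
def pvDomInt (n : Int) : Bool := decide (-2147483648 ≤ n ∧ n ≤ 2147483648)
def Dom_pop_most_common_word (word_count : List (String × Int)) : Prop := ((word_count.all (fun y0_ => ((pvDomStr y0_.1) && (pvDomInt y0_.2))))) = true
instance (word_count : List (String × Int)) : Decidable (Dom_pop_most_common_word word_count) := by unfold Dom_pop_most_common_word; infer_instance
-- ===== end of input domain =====

-- B replaces A's running-best scan by one sort of the keys under (-count, word) and takes the
-- first element (objective: simpler). Both Pythons also pop the chosen key from the dict (same
-- mutation); the equivalence proved here is about the RETURN value only.

-- ===== PORT A =====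
-- A iterates over the keys keeping a running best (higher count wins; on equal count the
-- smaller word wins). word_count[...] lookups are on keys known to be present, ported as getD.
def pop_most_common_word (word_count : List (String × Int)) : String :=
  let d := PySem.Dict.ofList word_count
  let ks := d.keys
  let max0 := (PySem.List.pyGet? ks 0).getD ""  -- list(word_count.keys())[0]; none (IndexError) excluded by Pre_
  ks.foldl (fun max_word word =>
    let m1 := if d.getD word 0 > d.getD max_word 0 then word else max_word
    if d.getD word 0 = d.getD m1 0 then (if word < m1 then word else m1) else m1) max0

-- ===== PORT B =====
-- Python's tuple key (-count, w) is ported as the lexicographic product key (exact: Python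
-- compares tuples lexicographically, and ASCII string comparison matches Lean's String order).
def pop_most_common_word_alt (word_count : List (String × Int)) : String :=
  let d := PySem.Dict.ofList word_count
  (PySem.List.pyGet? (PySem.List.sorted d.keys (fun w => toLex (-(d.getD w 0), w))) 0).getD ""

-- ===== PRECONDITION & SPEC =====
-- A raises IndexError on the empty dict (list(word_count.keys())[0]); B's sorted(...)[0] raises there too.
def Pre_pop_most_common_word (word_count : List (String × Int)) : Prop := word_count ≠ []
instance (word_count : List (String × Int)) : Decidable (Pre_pop_most_common_word word_count) := by unfold Pre_pop_most_common_word; infer_instance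
def pvWitness_pop_most_common_word : (List (String × Int)) := [("apple", 2), ("pie", 2), ("zoo", 1)]
def Spec_pop_most_common_word (word_count : List (String × Int)) (out : String) : Prop := out = pop_most_common_word_alt word_count
instance (word_count : List (String × Int)) (out : String) : Decidable (Spec_pop_most_common_word word_count out) := by unfold Spec_pop_most_common_word; infer_instance

-- ===== CLAIM (what is proved, stated in full; the proofs are below) =====
def Claim_equal_pop_most_common_word : Prop := ∀ (word_count : List (String × Int)), Dom_pop_most_common_word word_count → Pre_pop_most_common_word word_count → Spec_pop_most_common_word word_count (pop_most_common_word word_count)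

-- ===== LEMMAS AND PROOFS =====

-- the combined key A's updates and B's sort both order by
def pvKey (d : PySem.Dict String Int) (w : String) : Int ×ₗ String := toLex (-(d.getD w 0), w)

theorem pvKey_inj (d : PySem.Dict String Int) {a b : String} (h : pvKey d a = pvKey d b) : a = b := by
  have := congrArg (fun p => (ofLex p).2) h
  simpa [pvKey] using this

-- A's loop body picks, of the running best and the current word, the one with the smaller pvKey
theorem pvStep_min (d : PySem.Dict String Int) (a w : String) :
    (let m1 := if d.getD w 0 > d.getD a 0 then w else a
     let r := if d.getD w 0 = d.getD m1 0 then (if w < m1 then w else m1) else m1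
     (r = a ∨ r = w) ∧ pvKey d r ≤ pvKey d a ∧ pvKey d r ≤ pvKey d w) := by
  simp only [pvKey]
  by_cases h1 : d.getD w 0 > d.getD a 0
  · rw [if_pos h1, if_pos (rfl : d.getD w 0 = d.getD w 0), if_neg (lt_irrefl w)]
    exact ⟨Or.inr rfl, Prod.Lex.toLex_le_toLex.mpr (Or.inl (neg_lt_neg h1)), le_refl _⟩
  · rw [if_neg h1]
    by_cases h2 : d.getD w 0 = d.getD a 0
    · rw [if_pos h2]
      by_cases h3 : w < a
      · rw [if_pos h3]
        exact ⟨Or.inr rfl,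
          Prod.Lex.toLex_le_toLex.mpr (Or.inr ⟨congrArg Neg.neg h2, le_of_lt h3⟩), le_refl _⟩
      · rw [if_neg h3]
        exact ⟨Or.inl rfl, le_refl _,
          Prod.Lex.toLex_le_toLex.mpr (Or.inr ⟨congrArg Neg.neg h2.symm, le_of_not_gt h3⟩)⟩
    · rw [if_neg h2]
      have hlt : d.getD w 0 < d.getD a 0 := lt_of_le_of_ne (le_of_not_gt h1) h2
      exact ⟨Or.inl rfl, le_refl _, Prod.Lex.toLex_le_toLex.mpr (Or.inl (neg_lt_neg hlt))⟩

-- the fold over the whole key list returns an element that is pvKey-minimal among the start and the list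
theorem pvFold_min (d : PySem.Dict String Int) (t : List String) (a : String) :
    (let r := t.foldl (fun max_word word =>
        let m1 := if d.getD word 0 > d.getD max_word 0 then word else max_word
        if d.getD word 0 = d.getD m1 0 then (if word < m1 then word else m1) else m1) a
     (r = a ∨ r ∈ t) ∧ pvKey d r ≤ pvKey d a ∧ ∀ w ∈ t, pvKey d r ≤ pvKey d w) := by
  induction t generalizing a with
  | nil => simp
  | cons x xs ih =>
    simp only [List.foldl_cons]
    obtain ⟨hstep_mem, hstep_a, hstep_x⟩ := pvStep_min d a x
    set b := if d.getD x 0 = d.getD (if d.getD x 0 > d.getD a 0 then x else a) 0 then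
        (if x < (if d.getD x 0 > d.getD a 0 then x else a) then x
         else (if d.getD x 0 > d.getD a 0 then x else a))
      else (if d.getD x 0 > d.getD a 0 then x else a) with hb
    obtain ⟨hmem, hle, hall⟩ := ih b
    refine ⟨?_, le_trans hle hstep_a, ?_⟩
    · rcases hmem with h | h
      · rcases hstep_mem with h' | h'
        · exact Or.inl (h.trans h')
        · exact Or.inr (by rw [h, h']; exact List.mem_cons_self)
      · exact Or.inr (List.mem_cons_of_mem _ h)
    · intro w hw
      rcases List.mem_cons.mp hw with rfl | hw'
      · exact le_trans hle hstep_x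
      · exact hall _ hw'

-- the keys of a dict built from a nonempty pair list are nonempty
theorem pvKeys_ne_nil {l : List (String × Int)} (h : l ≠ []) :
    (PySem.Dict.ofList l).keys ≠ [] := by
  have hk : (PySem.Dict.ofList l).keys = PySem.Set.update (PySem.Dict.empty : PySem.Dict String Int).keys (l.map Prod.fst) :=
    PySem.Dict.keys_foldl_insert_key l Prod.fst (fun _ p => p.2) PySem.Dict.empty
  cases l with
  | nil => exact absurd rfl h
  | cons p t =>
    intro hnil
    have hp : p.1 ∈ (PySem.Dict.ofList (p :: t)).keys := by
      rw [hk, PySem.Dict.keys_empty]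
      exact (PySem.Set.mem_ofList ((p :: t).map Prod.fst) p.1).mpr (by simp)
    rw [hnil] at hp
    simp at hp

-- ===== VERDICT (by name: the statement is the Claim_ definition above) =====
theorem pop_most_common_word_spec : Claim_equal_pop_most_common_word := by
  intro wc _ hpre
  unfold Spec_pop_most_common_word pop_most_common_word pop_most_common_word_alt
  show (PySem.Dict.ofList wc).keys.foldl (fun max_word word =>
      let m1 := if (PySem.Dict.ofList wc).getD word 0 > (PySem.Dict.ofList wc).getD max_word 0 then word else max_word
      if (PySem.Dict.ofList wc).getD word 0 = (PySem.Dict.ofList wc).getD m1 0 then (if word < m1 then word else m1) else m1)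
      ((PySem.List.pyGet? (PySem.Dict.ofList wc).keys 0).getD "")
    = (PySem.List.pyGet? (PySem.List.sorted (PySem.Dict.ofList wc).keys
        (fun w => toLex (-((PySem.Dict.ofList wc).getD w 0), w))) 0).getD ""
  set d := PySem.Dict.ofList wc with hd
  have hks : d.keys ≠ [] := pvKeys_ne_nil hpre
  obtain ⟨k0, rest, hcons⟩ := List.exists_cons_of_ne_nil hks
  rw [hcons]
  have hget0 : PySem.List.pyGet? (k0 :: rest) (0 : Int) = some k0 := by
    simp [PySem.List.pyGet?, PySem.List.pyIdx?]
  rw [hget0, Option.getD_some]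
  -- A's side: the fold result m is pvKey-minimal over the keys
  obtain ⟨hmem, hle, hall⟩ := pvFold_min d (k0 :: rest) k0
  set m := (k0 :: rest).foldl (fun max_word word =>
      let m1 := if d.getD word 0 > d.getD max_word 0 then word else max_word
      if d.getD word 0 = d.getD m1 0 then (if word < m1 then word else m1) else m1) k0 with hm
  have hmemks : m ∈ (k0 :: rest) := by rcases hmem with h | h <;> simp [h]
  -- B's side: the sorted head h0 is pvKey-minimal over the keys
  have hkey : (fun w => toLex (-(d.getD w 0), w)) = fun w => pvKey d w := rfl
  rw [hkey]
  have hsne : PySem.List.sorted (k0 :: rest) (fun w => pvKey d w) false ≠ [] := by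
    rw [Ne, PySem.List.sorted_eq_nil_iff]; simp
  obtain ⟨h0, tl, hs⟩ := List.exists_cons_of_ne_nil hsne
  have hh0mem : h0 ∈ (k0 :: rest) := by
    rw [← PySem.List.mem_sorted (key := fun w => pvKey d w) (rev := false), hs]; simp
  have hh0min : ∀ y ∈ (k0 :: rest), pvKey d h0 ≤ pvKey d y :=
    PySem.List.key_head_sorted_le (k0 :: rest) (fun w => pvKey d w) hs
  have heq : m = h0 := pvKey_inj d (le_antisymm (hall h0 hh0mem) (hh0min m hmemks))
  have hgets : PySem.List.pyGet? (h0 :: tl) (0 : Int) = some h0 := by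
    simp [PySem.List.pyGet?, PySem.List.pyIdx?]
  rw [hs, hgets, Option.getD_some]
  exact heq
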